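-- pv_equiv track=rewrite | github.com/clivepato93/Edabit_challenges | Python/Medium/calculate_arrowhead.py | calculate_arrowhead
-- ===== SOURCE A (Python) =====
-- def calculate_arrowhead(lst):
--     r=[">",0]
--     l=["<",0]
--     for i in lst:
--         r[1]+=i.count(">")
--         l[1]+=i.count("<")
--     if r[1]>l[1]:
--         return ">"*(r[1]-l[1])
--     elif l[1]>r[1]:
--         return "<"*(l[1]-r[1])
--     else:
--         return ""
-- ===== SOURCE B (Python) =====
-- def calculate_arrowhead(lst):
--     stack = []
--     for s in lst:
--         for ch in s:
--             if ch == '>' or ch == '<':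
--                 if stack and stack[-1] != ch:
--                     stack.pop()
--                 else:
--                     stack.append(ch)
--     return ''.join(stack)
-- ===== Notes on version B (the rewrite author's own statement) =====
-- stated objective: alternative
-- what changed: B scans every character once with a cancellation stack (an arrow cancels the opposite arrow on top of the stack, otherwise it is pushed) and returns the leftover stack joined, instead of A's per-element counting of '>' and '<' followed by a three-way comparison and string multiplication.
import Mathlib
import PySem

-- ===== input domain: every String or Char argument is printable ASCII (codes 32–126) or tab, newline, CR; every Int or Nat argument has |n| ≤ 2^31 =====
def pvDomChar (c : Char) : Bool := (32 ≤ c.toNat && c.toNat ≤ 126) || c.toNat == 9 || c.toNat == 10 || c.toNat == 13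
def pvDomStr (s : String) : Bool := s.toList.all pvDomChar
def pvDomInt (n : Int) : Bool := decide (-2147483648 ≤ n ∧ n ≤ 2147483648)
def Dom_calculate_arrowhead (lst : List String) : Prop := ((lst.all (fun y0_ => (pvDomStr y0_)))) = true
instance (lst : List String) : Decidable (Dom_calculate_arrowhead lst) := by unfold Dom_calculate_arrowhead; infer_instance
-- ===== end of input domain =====

-- B replaces A's count-and-subtract scheme by a cancellation stack scanned over every character
-- (opposite arrows annihilate on the stack, the leftover stack is the answer): alternative algorithm, same cost.
-- ===== PORT A =====
def calculate_arrowhead (lst : List String) : String :=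
  let rl := lst.foldl
    (fun (rl : Nat × Nat) i => (rl.1 + PySem.Str.count i ">", rl.2 + PySem.Str.count i "<"))
    (0, 0)
  if rl.1 > rl.2 then String.ofList (PySem.List.pyRepeat ['>'] ((rl.1 : Int) - (rl.2 : Int)))
  else if rl.2 > rl.1 then String.ofList (PySem.List.pyRepeat ['<'] ((rl.2 : Int) - (rl.1 : Int)))
  else ""

-- ===== PORT B =====
-- the Python stack's top (stack[-1]) is the list's HEAD here; ''.join(stack) is therefore the reversed list
def pvStep (st : List Char) (ch : Char) : List Char :=
  if ch = '>' ∨ ch = '<' then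
    if st ≠ [] ∧ st.head? ≠ some ch then st.tail else ch :: st
  else st

def calculate_arrowhead_alt (lst : List String) : String :=
  let st := lst.foldl (fun st s => s.toList.foldl pvStep st) []
  String.ofList st.reverse

-- ===== PRECONDITION & SPEC =====
def Spec_calculate_arrowhead (lst : List String) (out : String) : Prop := out = calculate_arrowhead_alt lst
instance (lst : List String) (out : String) : Decidable (Spec_calculate_arrowhead lst out) := by unfold Spec_calculate_arrowhead; infer_instance

-- ===== CLAIM (what is proved, stated in full; the proofs are below) =====
def Claim_equal_calculate_arrowhead : Prop := ∀ (lst : List String), Dom_calculate_arrowhead lst → Spec_calculate_arrowhead lst (calculate_arrowhead lst)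

-- ===== LEMMAS AND PROOFS =====
-- the stack after net difference d: homogeneous run of the majority arrow
def pvRun (d : Int) : List Char := if d ≥ 0 then List.replicate d.toNat '>' else List.replicate (-d).toNat '<'

theorem step_gt (d : Int) : pvStep (pvRun d) '>' = pvRun (d + 1) := by
  unfold pvStep pvRun
  rw [if_pos (Or.inl rfl)]
  by_cases hd : d ≥ 0
  · have h1 : d + 1 ≥ 0 := by omega
    rw [if_pos hd, if_pos h1]
    have hC : ¬ (List.replicate d.toNat '>' ≠ [] ∧ (List.replicate d.toNat '>').head? ≠ some '>') := by
      cases h : d.toNat with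
      | zero => simp
      | succ n => simp [List.replicate]
    rw [if_neg hC, show (d + 1).toNat = d.toNat + 1 by omega]
    simp [List.replicate]
  · rw [if_neg hd]
    have hlen : (-d).toNat = ((-d).toNat - 1) + 1 := by omega
    rw [hlen]
    rw [if_pos (by simp [List.replicate])]
    by_cases h1 : d + 1 ≥ 0
    · have : d = -1 := by omega
      subst this
      norm_num [pvRun, List.replicate]
    · rw [if_neg h1, show (-(d + 1)).toNat = (-d).toNat - 1 by omega]
      simp [List.replicate]

theorem step_lt (d : Int) : pvStep (pvRun d) '<' = pvRun (d - 1) := by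
  unfold pvStep pvRun
  rw [if_pos (Or.inr rfl)]
  by_cases hd : d ≥ 0
  · rw [if_pos hd]
    by_cases hz : d = 0
    · subst hz
      rw [if_neg (by simp)]
      simp [List.replicate]
    · have hlen : d.toNat = (d.toNat - 1) + 1 := by omega
      rw [hlen, if_pos (by simp [List.replicate])]
      by_cases h1 : d - 1 ≥ 0
      · rw [if_pos h1]
        rw [show (d - 1).toNat = d.toNat - 1 by omega]
        simp [List.replicate]
      · omega
  · rw [if_neg hd]
    have h1 : ¬ (d - 1 ≥ 0) := by omega
    have hC : ¬ (List.replicate (-d).toNat '<' ≠ [] ∧ (List.replicate (-d).toNat '<').head? ≠ some '<') := by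
      have hlen : (-d).toNat = ((-d).toNat - 1) + 1 := by omega
      rw [hlen]; simp [List.replicate]
    rw [if_neg hC, if_neg h1, show (-(d - 1)).toNat = (-d).toNat + 1 by omega]
    simp [List.replicate]

theorem step_other (st : List Char) (ch : Char) (hg : ch ≠ '>') (hl : ch ≠ '<') :
    pvStep st ch = st := by
  unfold pvStep
  rw [if_neg (by simp [hg, hl])]

-- folding the step over a char list shifts the run by (count '>' - count '<')
theorem foldl_step_run (s : List Char) : ∀ (d : Int),
    s.foldl pvStep (pvRun d) = pvRun (d + (s.count '>' : Int) - (s.count '<' : Int)) := by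
  induction s with
  | nil => intro d; simp
  | cons x xs ih =>
    intro d
    by_cases hg : x = '>'
    · subst hg
      simp only [List.foldl, step_gt, ih]
      simp only [List.count_cons]
      norm_num
      congr 1
      push_cast
      ring
    · by_cases hl : x = '<'
      · subst hl
        simp only [List.foldl, step_lt, ih]
        simp only [List.count_cons]
        norm_num
        congr 1
        push_cast
        ring
      · simp only [List.foldl, step_other _ _ hg hl, ih]
        simp [hg, hl]

-- count.go with single-character pattern and enough fuel is List.count
theorem go_single (c : Char) : ∀ (fuel : Nat) (s : List Char) (acc : Nat),
    s.length ≤ fuel → PySem.Chars.count.go [c] fuel s acc = acc + s.count c := by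
  intro fuel
  induction fuel with
  | zero =>
    intro s acc h
    cases s with
    | nil => simp [PySem.Chars.count.go]
    | cons x t => simp at h
  | succ n ih =>
    intro s acc h
    cases s with
    | nil => simp [PySem.Chars.count.go]
    | cons x t =>
      simp only [PySem.Chars.count.go]
      by_cases hx : c = x
      · subst hx
        simp [List.isPrefixOf, ih t (acc + 1) (by simpa using h)]
        omega
      · have hpre : ([c].isPrefixOf (x :: t)) = false := by
          simp [List.isPrefixOf, hx]
        simp [hpre, ih t acc (by simpa using h), List.count_cons]
        exact fun h' => hx h'.symm

theorem count_single (s : List Char) (c : Char) :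
    PySem.Chars.count s [c] = s.count c := by
  simp [PySem.Chars.count]
  simpa using go_single c s.length s 0 (le_refl _)

-- A's pair-accumulating fold computes the two sums
theorem foldA (lst : List String) : ∀ (a b : Nat),
    lst.foldl
      (fun (rl : Nat × Nat) i => (rl.1 + PySem.Str.count i ">", rl.2 + PySem.Str.count i "<"))
      (a, b)
    = (a + (lst.map (fun i => (i.toList.count '>'))).sum,
       b + (lst.map (fun i => (i.toList.count '<'))).sum) := by
  induction lst with
  | nil => simp
  | cons x xs ih =>
    intro a b
    simp only [List.foldl, List.map, List.sum_cons, ih]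
    have h1 : PySem.Str.count x ">" = x.toList.count '>' := count_single x.toList '>'
    have h2 : PySem.Str.count x "<" = x.toList.count '<' := count_single x.toList '<'
    rw [h1, h2]
    simp [Nat.add_assoc]

-- B's outer fold over the whole list leaves the run at the total net difference
theorem foldB (lst : List String) : ∀ (d : Int),
    lst.foldl (fun st s => s.toList.foldl pvStep st) (pvRun d)
    = pvRun (d + (((lst.map (fun i => (i.toList.count '>'))).sum : Nat) : Int)
               - (((lst.map (fun i => (i.toList.count '<'))).sum : Nat) : Int)) := by
  induction lst with
  | nil => intro d; simp
  | cons x xs ih =>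
    intro d
    simp only [List.foldl, foldl_step_run, ih, List.map, List.sum_cons]
    congr 1
    push_cast
    ring

theorem foldB0 (lst : List String) :
    lst.foldl (fun st s => s.toList.foldl pvStep st) []
    = pvRun ((((lst.map (fun i => (i.toList.count '>'))).sum : Nat) : Int)
           - (((lst.map (fun i => (i.toList.count '<'))).sum : Nat) : Int)) := by
  rw [show ([] : List Char) = pvRun 0 by simp [pvRun], foldB lst 0]
  norm_num

theorem reverse_run (d : Int) : (pvRun d).reverse = pvRun d := by
  unfold pvRun; split_ifs <;> simp

-- ===== VERDICT (by name: the statement is the Claim_ definition above) =====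
theorem calculate_arrowhead_spec : Claim_equal_calculate_arrowhead := by
  intro lst _
  unfold Spec_calculate_arrowhead calculate_arrowhead calculate_arrowhead_alt
  simp only [foldA lst 0 0, foldB0 lst, Nat.zero_add, reverse_run,
    PySem.List.pyRepeat_singleton]
  generalize (lst.map (fun i => (i.toList.count '>'))).sum = G
  generalize (lst.map (fun i => (i.toList.count '<'))).sum = L
  rcases lt_trichotomy G L with h | h | h
  · rw [if_neg (show ¬ G > L by omega), if_pos h]
    unfold pvRun
    rw [if_neg (show ¬ ((G : Int) - (L : Int) ≥ 0) by omega)]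
    rw [show ((L : Int) - G).toNat = (-((G : Int) - L)).toNat by omega]
  · rw [if_neg (show ¬ G > L by omega), if_neg (show ¬ L > G by omega)]
    unfold pvRun
    rw [if_pos (show ((G : Int) - (L : Int) ≥ 0) by omega),
      show ((G : Int) - L).toNat = 0 by omega]
    rfl
  · rw [if_pos h]
    unfold pvRun
    rw [if_pos (show ((G : Int) - (L : Int) ≥ 0) by omega)]
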